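-- pv_equiv track=rewrite | github.com/nyannko/leetcode-python | alg/array_nesting.py | dfs_length
-- ===== SOURCE A (Python) =====
-- def dfs_length(nums, start_index, start_element):
--     visited = set([start_index])
--     stack = [start_element]
--
--     while stack:
--         next_index = stack.pop()
--         if next_index not in visited:
--             stack.append(nums[next_index])
--             visited.add(next_index)
--     return len(visited), visited
-- ===== SOURCE B (Python) =====
-- def _chain(nums, c, seen):
--     """Ordered list of the new chain nodes starting at c, built front-to-back by
--     recursion; stops just before the first node already seen."""
--     if c in seen:
--         return []
--     return [c] + _chain(nums, nums[c], seen + (c,))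
--
--
-- def dfs_length(nums, start_index, start_element):
--     # Recursive decomposition: materialise the chain as an ordered list first,
--     # then assemble the answer; the length is 1 + len(body) by arithmetic
--     # (body is duplicate-free and never contains start_index), not len(set).
--     body = _chain(nums, start_element, (start_index,))
--     return 1 + len(body), {start_index, *body}
-- ===== Notes on version B (the rewrite author's own statement) =====
-- stated objective: alternative
-- what changed: A's imperative worklist loop mutating a visited set is replaced by a pure recursion that materialises the chain as an ordered list, after which the count is computed arithmetically as 1 + len(body) and the set is assembled once at the end.
import Mathlib
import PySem

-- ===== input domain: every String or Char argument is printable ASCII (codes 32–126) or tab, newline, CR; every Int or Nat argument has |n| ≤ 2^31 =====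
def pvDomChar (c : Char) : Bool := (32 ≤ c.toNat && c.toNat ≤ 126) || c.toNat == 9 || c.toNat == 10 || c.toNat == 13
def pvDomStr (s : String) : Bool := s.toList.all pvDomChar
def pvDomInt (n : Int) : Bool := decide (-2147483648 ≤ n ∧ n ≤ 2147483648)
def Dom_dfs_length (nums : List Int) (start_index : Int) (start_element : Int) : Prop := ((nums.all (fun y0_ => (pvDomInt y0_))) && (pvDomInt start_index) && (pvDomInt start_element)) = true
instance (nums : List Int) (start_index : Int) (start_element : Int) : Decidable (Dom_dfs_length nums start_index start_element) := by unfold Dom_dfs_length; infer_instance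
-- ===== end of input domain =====

-- B replaces A's imperative worklist loop by a pure recursion that builds the chain as an
-- ordered list, computes the count arithmetically and assembles the set once at the end.

-- ===== PORT A =====
-- A's while-loop over (visited, stack); fuel 2*len+3 exceeds the loop's iteration count on
-- every input admitted by Pre_ (at most 2*len distinct in-range indices can be pushed).
def aLoop (nums : List Int) (visited : PySem.Set Int) (stack : List Int) : Nat → Int × List Int
  | 0 => (PySem.Set.len visited, visited)                      -- fuel fallback (unreachable under Pre_)
  | fuel+1 =>
    match PySem.List.pop? stack (-1) with
    | none => (PySem.Set.len visited, visited)                 -- while stack: exits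
    | some (next_index, stack') =>
      if PySem.Set.contains visited next_index then
        aLoop nums visited stack' fuel
      else
        match PySem.List.pyGet? nums next_index with
        | none => (PySem.Set.len visited, visited)             -- IndexError in Python; excluded by Pre_
        | some v => aLoop nums (PySem.Set.add visited next_index) (stack' ++ [v]) fuel

def dfs_length (nums : List Int) (start_index : Int) (start_element : Int) : Int × List Int :=
  aLoop nums (PySem.Set.ofList [start_index]) [start_element] (2 * nums.length + 3)

-- ===== PORT B =====
-- _chain of Source B: pure recursion producing the ordered list of new chain nodes (fuel as above).
def bChain (nums : List Int) (c : Int) (seen : List Int) : Nat → List Int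
  | 0 => []                                                    -- fuel fallback (unreachable under Pre_)
  | fuel+1 =>
    if seen.contains c then []
    else
      match PySem.List.pyGet? nums c with
      | none => []                                             -- IndexError in Python; excluded by Pre_
      | some v => [c] ++ bChain nums v (seen ++ [c]) fuel

def dfs_length_alt (nums : List Int) (start_index : Int) (start_element : Int) : Int × List Int :=
  (1 + ((bChain nums start_element [start_index] (2 * nums.length + 3)).length : Int),
   PySem.Set.ofList ([start_index] ++ bChain nums start_element [start_index] (2 * nums.length + 3)))

-- ===== PRECONDITION & SPEC =====
-- One step of the index chain c ↦ nums[c] (none once an index was out of range = IndexError).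
def pvChainStep (nums : List Int) : Option Int → Option Int
  | none => none
  | some c => PySem.List.pyGet? nums c

def pvChainAt (nums : List Int) (c : Int) (k : Nat) : Option Int := (pvChainStep nums)^[k] (some c)

-- Pre_ holds exactly when A returns: the index chain from start_element revisits an earlier
-- chain index or start_index while still in range (within 2*len steps, enough by pigeonhole);
-- on all other inputs the chain leaves range first and A raises IndexError.
def Pre_dfs_length (nums : List Int) (start_index : Int) (start_element : Int) : Prop :=
  ∃ k ≤ 2 * nums.length, (pvChainAt nums start_element k).isSome ∧
    (pvChainAt nums start_element k = some start_index ∨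
      ∃ j < k, pvChainAt nums start_element j = pvChainAt nums start_element k)
instance (nums : List Int) (start_index : Int) (start_element : Int) : Decidable (Pre_dfs_length nums start_index start_element) := by unfold Pre_dfs_length; infer_instance

def pvWitness_dfs_length : List Int × Int × Int := ([0, 1], 0, 1)

def Spec_dfs_length (nums : List Int) (start_index : Int) (start_element : Int) (out : Int × List Int) : Prop := out = dfs_length_alt nums start_index start_element
instance (nums : List Int) (start_index : Int) (start_element : Int) (out : Int × List Int) : Decidable (Spec_dfs_length nums start_index start_element out) := by unfold Spec_dfs_length; infer_instance

-- ===== CLAIM (what is proved, stated in full; the proofs are below) =====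
def Claim_equal_dfs_length : Prop := ∀ (nums : List Int) (start_index : Int) (start_element : Int), Dom_dfs_length nums start_index start_element → Pre_dfs_length nums start_index start_element → Spec_dfs_length nums start_index start_element (dfs_length nums start_index start_element)

-- ===== LEMMAS AND PROOFS =====

-- The loop on an empty stack returns immediately.
theorem aLoop_nil (nums : List Int) (V : PySem.Set Int) (fuel : Nat) :
    aLoop nums V [] fuel = ((V.length : Int), V) := by
  cases fuel <;> simp [aLoop, PySem.List.pop?, PySem.Set.len]

-- A's loop with a singleton stack computes exactly (|V| + |chain|, V ++ chain) for B's chain.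
theorem aLoop_eq_chain (nums : List Int) (fuel : Nat) (V : PySem.Set Int) (c : Int) :
    aLoop nums V [c] fuel =
      ((V.length : Int) + ((bChain nums c V fuel).length : Int), V ++ bChain nums c V fuel) := by
  induction fuel generalizing V c with
  | zero => simp [aLoop, bChain, PySem.Set.len]
  | succ fuel ih =>
      show (if PySem.Set.contains V c then aLoop nums V [] fuel
            else match PySem.List.pyGet? nums c with
              | none => (PySem.Set.len V, V)
              | some v => aLoop nums (PySem.Set.add V c) ([] ++ [v]) fuel) = _
      by_cases h : c ∈ V
      · have hc : List.contains V c = true := by simpa using h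
        simp [PySem.Set.contains, h, bChain, aLoop_nil]
      · have hc : ¬ (List.contains V c = true) := by simpa using h
        have hc' : ¬ (PySem.Set.contains V c = true) := by
          simpa [PySem.Set.contains] using h
        rw [if_neg hc']
        unfold bChain
        rw [if_neg hc]
        cases hg : PySem.List.pyGet? nums c with
        | none => simp [PySem.Set.len]
        | some v =>
            simp only [List.nil_append]
            have hadd : PySem.Set.add V c = V ++ [c] := by
              simp [PySem.Set.add, PySem.Set.contains, h]
            rw [hadd, ih]
            simp [List.append_assoc]
            ring

-- bChain never reproduces a seen node and never repeats a node.
theorem bChain_fresh (nums : List Int) (fuel : Nat) (c : Int) (seen : List Int) :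
    (∀ x ∈ bChain nums c seen fuel, x ∉ seen) ∧ (bChain nums c seen fuel).Nodup := by
  induction fuel generalizing c seen with
  | zero => simp [bChain]
  | succ fuel ih =>
      unfold bChain
      by_cases h : List.contains seen c = true
      · rw [if_pos h]; simp
      · rw [if_neg h]
        cases hg : PySem.List.pyGet? nums c with
        | none => simp
        | some v =>
            obtain ⟨h1, h2⟩ := ih v (seen ++ [c])
            have hcs : c ∉ seen := by simpa using h
            constructor
            · intro x hx hxs
              rcases List.mem_cons.mp (by simpa using hx) with rfl | hx'
              · exact hcs hxs
              · exact h1 x hx' (by simp [hxs])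
            · refine List.nodup_cons.mpr ⟨fun hcmem => ?_, h2⟩
              exact h1 c hcmem (by simp)

-- ===== VERDICT (by name: the statement is the Claim_ definition above) =====
theorem dfs_length_spec : Claim_equal_dfs_length := by
  intro nums start_index start_element _ _
  unfold Spec_dfs_length dfs_length dfs_length_alt
  obtain ⟨h1, h2⟩ := bChain_fresh nums (2 * nums.length + 3) start_element [start_index]
  have hofl : PySem.Set.ofList [start_index] = [start_index] :=
    PySem.Set.ofList_eq_self_of_nodup _ (List.nodup_singleton _)
  have hnodup : (start_index :: bChain nums start_element [start_index] (2 * nums.length + 3)).Nodup := by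
    refine List.nodup_cons.mpr ⟨fun hmem => ?_, h2⟩
    exact h1 _ hmem (by simp)
  show aLoop nums (PySem.Set.ofList [start_index]) [start_element] (2 * nums.length + 3) = _
  rw [hofl, aLoop_eq_chain]
  rw [PySem.Set.ofList_eq_self_of_nodup _ (by simpa using hnodup)]
  simp
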